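-- pv_equiv track=rewrite | github.com/zeetwii/aiPlaysPokemon | locationTracking/pathfinder.py | describeRoute
-- ===== SOURCE A (Python) =====
-- def describeRoute(path):
--     """
--     Generate a human-readable description of a path.
--
--     Args:
--         path: list of (mapName, col, row) waypoints.
--
--     Returns:
--         str description of the route.
--     """
--     if not path:
--         return "No path."
--
--     segments = []
--     currentMap = path[0][0]
--     segmentStart = 0
--
--     for i in range(1, len(path)):
--         if path[i][0] != currentMap:
--             steps = i - segmentStart
--             segments.append(f"  {currentMap}: {steps} steps")
--             currentMap = path[i][0]
--             segmentStart = i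
--
--     # Last segment
--     steps = len(path) - segmentStart
--     segments.append(f"  {currentMap}: {steps} steps")
--
--     totalSteps = len(path) - 1
--     desc = f"Route ({totalSteps} total steps, {len(segments)} maps):\n"
--     desc += '\n'.join(segments)
--     return desc
-- ===== SOURCE B (Python) =====
-- def describeRoute(path):
--     """
--     Generate a human-readable description of a path.
--
--     Args:
--         path: list of (mapName, col, row) waypoints.
--
--     Returns:
--         str description of the route.
--     """
--     if not path:
--         return "No path."
--
--     segments = []
--     rest = path
--     while rest:
--         name = rest[0][0]
--         k = 1
--         while k < len(rest) and rest[k][0] == name: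
--             k += 1
--         segments.append(f"  {name}: {k} steps")
--         rest = rest[k:]
--
--     totalSteps = len(path) - 1
--     return f"Route ({totalSteps} total steps, {len(segments)} maps):\n" + '\n'.join(segments)
-- ===== Notes on version B (the rewrite author's own statement) =====
-- stated objective: alternative
-- what changed: Replaces A's single indexed pass that tracks currentMap/segmentStart accumulators with run-chunking: repeatedly take the leading run of equal map names off the front of the remaining suffix and emit one segment per run.
import Mathlib
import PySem

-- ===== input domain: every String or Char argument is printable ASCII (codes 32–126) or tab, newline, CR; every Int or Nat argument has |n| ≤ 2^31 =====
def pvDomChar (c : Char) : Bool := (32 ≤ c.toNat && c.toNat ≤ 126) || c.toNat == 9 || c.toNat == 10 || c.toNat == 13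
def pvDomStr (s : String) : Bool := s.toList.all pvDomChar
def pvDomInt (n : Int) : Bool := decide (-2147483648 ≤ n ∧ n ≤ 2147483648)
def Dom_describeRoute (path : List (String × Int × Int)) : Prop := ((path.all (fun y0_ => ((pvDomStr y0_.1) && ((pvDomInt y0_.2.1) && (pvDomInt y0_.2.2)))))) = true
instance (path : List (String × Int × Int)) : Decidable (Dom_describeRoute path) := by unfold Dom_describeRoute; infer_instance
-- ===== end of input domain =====

-- B replaces A's indexed pass with run-chunking off the front of the remaining suffix (alternative decomposition, same cost).

-- ===== PORT A =====
-- the loop body of A's 'for i in range(1, len(path))'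
def stepA (s : List String × String × Int) (i : Int) (w : String × Int × Int) :
    List String × String × Int :=
  if w.1 ≠ s.2.1 then
    (s.1 ++ ["  " ++ s.2.1 ++ ": " ++ PySem.Int.toStr (i - s.2.2) ++ " steps"], w.1, i)
  else s

def describeRoute (path : List (String × Int × Int)) : String :=
  if path = [] then "No path."
  else
    let currentMap := (PySem.List.pyGetD path 0 ("", 0, 0)).1
    let st := (PySem.List.pyRange 1 (path.length : Int) 1).foldl
      (fun acc i => stepA acc i (PySem.List.pyGetD path i ("", 0, 0)))
      (([] : List String), currentMap, (0 : Int))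
    let segments := st.1 ++
      ["  " ++ st.2.1 ++ ": " ++ PySem.Int.toStr ((path.length : Int) - st.2.2) ++ " steps"]
    "Route (" ++ PySem.Int.toStr ((path.length : Int) - 1) ++ " total steps, " ++
      PySem.Int.toStr (segments.length : Int) ++ " maps):\n" ++ PySem.Str.join "\n" segments

-- ===== PORT B =====
-- leading-run chunking: the inner 'while' is takeWhile, 'rest = rest[k:]' is dropWhile
def groupRuns : List (String × Int × Int) → List (String × Nat)
  | [] => []
  | w :: t =>
    (w.1, 1 + (t.takeWhile (fun v => v.1 == w.1)).length) ::
      groupRuns (t.dropWhile (fun v => v.1 == w.1))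
termination_by l => l.length
decreasing_by
  simp only [List.length_cons]
  exact Nat.lt_succ_of_le (List.length_dropWhile_le _ _)

def describeRoute_alt (path : List (String × Int × Int)) : String :=
  if path = [] then "No path."
  else
    let segments := (groupRuns path).map
      (fun g => "  " ++ g.1 ++ ": " ++ PySem.Int.toStr (g.2 : Int) ++ " steps")
    "Route (" ++ PySem.Int.toStr ((path.length : Int) - 1) ++ " total steps, " ++
      PySem.Int.toStr (segments.length : Int) ++ " maps):\n" ++ PySem.Str.join "\n" segments

-- ===== PRECONDITION & SPEC =====
def Spec_describeRoute (path : List (String × Int × Int)) (out : String) : Prop := out = describeRoute_alt path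
instance (path : List (String × Int × Int)) (out : String) : Decidable (Spec_describeRoute path out) := by unfold Spec_describeRoute; infer_instance

-- ===== CLAIM (what is proved, stated in full; the proofs are below) =====
def Claim_equal_describeRoute : Prop := ∀ (path : List (String × Int × Int)), Dom_describeRoute path → Spec_describeRoute path (describeRoute path)

-- ===== LEMMAS AND PROOFS =====

-- run-length encoding with an open current run (cur, k): the abstract shape of A's loop state
def runsC (cur : String) (k : Int) : List (String × Int × Int) → List (String × Int)
  | [] => [(cur, k)]
  | w :: t => if w.1 ≠ cur then (cur, k) :: runsC w.1 1 t else runsC cur (k + 1) t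

theorem runsC_eq_groupRuns (t : List (String × Int × Int)) :
    ∀ (cur : String) (k : Int),
    runsC cur k t = (cur, k + ((t.takeWhile (fun v => v.1 == cur)).length : Int)) ::
      (groupRuns (t.dropWhile (fun v => v.1 == cur))).map (fun g => (g.1, (g.2 : Int))) := by
  induction t with
  | nil => intro cur k; simp [runsC, groupRuns]
  | cons w t ih =>
    intro cur k
    by_cases h : w.1 = cur
    · simp [runsC, h, List.takeWhile, List.dropWhile, ih cur (k + 1)]
      ring
    · have hb : (w.1 == cur) = false := by simp [h]
      simp [runsC, h, List.takeWhile, List.dropWhile, hb, groupRuns, ih w.1 1]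

-- A's fold over the indices, converted to a fold over enumerate of the suffix
theorem foldl_range_enum {β : Type} (path : List (String × Int × Int))
    (g : β → Int → (String × Int × Int) → β) :
    ∀ (n s : Nat) (init : β), path.length - s ≤ n →
    (PySem.List.pyRange (s : Int) (path.length : Int) 1).foldl
        (fun acc i => g acc i (PySem.List.pyGetD path i ("", 0, 0))) init
    = (PySem.List.enumerate (path.drop s) (s : Int)).foldl
        (fun acc p => g acc p.1 p.2) init := by
  intro n
  induction n with
  | zero =>
    intro s init h
    have hs : path.length ≤ s := by omega
    rw [PySem.List.pyRange_one_eq_nil (by exact_mod_cast hs), List.drop_eq_nil_of_le hs]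
    simp [PySem.List.enumerate]
  | succ n ih =>
    intro s init h
    by_cases hs : s < path.length
    · rw [PySem.List.pyRange_one_cons (by exact_mod_cast hs)]
      have hd : path.drop s = path[s] :: path.drop (s + 1) := List.drop_eq_getElem_cons hs
      rw [hd, PySem.List.enumerate_cons]
      simp only [List.foldl_cons]
      have hg : PySem.List.pyGetD path (s : Int) ("", 0, 0) = path[s] := by
        rw [PySem.List.pyGetD_natCast]; exact List.getD_eq_getElem _ _ hs
      rw [hg]
      have := ih (s + 1) (g init (s : Int) path[s]) (by omega)
      push_cast at this ⊢
      exact this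
    · have hs' : path.length ≤ s := by omega
      rw [PySem.List.pyRange_one_eq_nil (by exact_mod_cast hs'), List.drop_eq_nil_of_le hs']
      simp [PySem.List.enumerate]

-- the loop invariant: A's fold, closed off with its final segment, is the runsC encoding
theorem foldA_runsC (t : List (String × Int × Int)) :
    ∀ (s start : Int) (segs : List String) (cur : String),
    (let st := (PySem.List.enumerate t s).foldl
        (fun acc p => stepA acc p.1 p.2) (segs, cur, start);
      st.1 ++ ["  " ++ st.2.1 ++ ": " ++ PySem.Int.toStr ((s + (t.length : Int)) - st.2.2) ++ " steps"])
    = segs ++ (runsC cur (s - start) t).map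
        (fun g => "  " ++ g.1 ++ ": " ++ PySem.Int.toStr g.2 ++ " steps") := by
  induction t with
  | nil => intro s start segs cur; simp [runsC, PySem.List.enumerate]
  | cons w t ih =>
    intro s start segs cur
    rw [PySem.List.enumerate_cons]
    simp only [List.foldl_cons]
    by_cases h : w.1 = cur
    · have : stepA (segs, cur, start) s w = (segs, cur, start) := by simp [stepA, h]
      rw [this]
      have := ih (s + 1) start segs cur
      simp only at this ⊢
      rw [show s + ((w :: t).length : Int) = (s + 1) + (t.length : Int) by
            simp; ring] at *
      rw [this, runsC, if_neg (by simp [h]),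
          show s + 1 - start = s - start + 1 by ring]
    · have : stepA (segs, cur, start) s w =
          (segs ++ ["  " ++ cur ++ ": " ++ PySem.Int.toStr (s - start) ++ " steps"], w.1, s) := by
        simp [stepA, h]
      rw [this]
      have := ih (s + 1) s (segs ++ ["  " ++ cur ++ ": " ++ PySem.Int.toStr (s - start) ++ " steps"]) w.1
      simp only at this ⊢
      rw [show s + ((w :: t).length : Int) = (s + 1) + (t.length : Int) by
            simp; ring] at *
      rw [this, runsC, if_pos (by simp [h])]
      simp [show s + 1 - s = (1 : Int) by ring]

-- ===== VERDICT (by name: the statement is the Claim_ definition above) =====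
theorem describeRoute_spec : Claim_equal_describeRoute := by
  intro path _
  unfold Spec_describeRoute describeRoute describeRoute_alt
  by_cases hp : path = []
  · simp [hp]
  · simp only [if_neg hp]
    obtain ⟨w, t, rfl⟩ : ∃ w t, path = w :: t := by
      cases path with
      | nil => exact absurd rfl hp
      | cons w t => exact ⟨w, t, rfl⟩
    have h0 : PySem.List.pyGetD (w :: t) 0 ("", 0, 0) = w := PySem.List.pyGetD_zero_cons _ _ _
    have hrange := foldl_range_enum (w :: t)
      (fun acc i x => stepA acc i x) (w :: t).length 1
      (([] : List String), w.1, (0 : Int)) (by omega)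
    simp only [List.drop_one, List.tail_cons, Nat.cast_one] at hrange
    have hfold := foldA_runsC t 1 0 [] w.1
    simp only [List.nil_append, show (1:Int) - 0 = 1 from by ring] at hfold
    have hruns := runsC_eq_groupRuns t w.1 1
    -- segments of A = segments of B
    have hseg :
        (let st := (PySem.List.pyRange 1 ((w :: t).length : Int) 1).foldl
            (fun acc i => stepA acc i (PySem.List.pyGetD (w :: t) i ("", 0, 0)))
            (([] : List String), (PySem.List.pyGetD (w :: t) 0 ("", 0, 0)).1, (0 : Int));
          st.1 ++ ["  " ++ st.2.1 ++ ": " ++ PySem.Int.toStr (((w :: t).length : Int) - st.2.2) ++ " steps"])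
        = (groupRuns (w :: t)).map
            (fun g => "  " ++ g.1 ++ ": " ++ PySem.Int.toStr (g.2 : Int) ++ " steps") := by
      simp only [h0]
      rw [hrange]
      have hlen : ((w :: t).length : Int) = 1 + (t.length : Int) := by simp; ring
      rw [hlen, hfold, hruns, groupRuns]
      simp [List.map_map, Function.comp]
    simp only at hseg
    rw [hseg]
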